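-- pv_equiv track=rewrite | github.com/resoltico/FTLLexEngine | src/ftllexengine/parsing/date_patterns.py | _tokenize_babel_pattern
-- ===== SOURCE A (Python) =====
-- def _tokenize_babel_pattern(pattern: str) -> list[str]:
--     """Tokenize a CLDR pattern into atomic tokens."""
--     tokens: list[str] = []
--     i = 0
--     n = len(pattern)
--
--     while i < n:
--         char = pattern[i]
--
--         if char == "'":
--             if i + 1 < n and pattern[i + 1] == "'":
--                 tokens.append("'")
--                 i += 2
--                 continue
--
--             i += 1
--             literal_chars: list[str] = []
--
--             while i < n:
--                 if pattern[i] == "'":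
--                     if i + 1 < n and pattern[i + 1] == "'":
--                         literal_chars.append("'")
--                         i += 2
--                     else:
--                         i += 1
--                         break
--                 else:
--                     literal_chars.append(pattern[i])
--                     i += 1
--
--             if literal_chars:
--                 tokens.append("".join(literal_chars))
--             continue
--
--         if char.isalpha():
--             j = i + 1
--             while j < n and pattern[j] == char:
--                 j += 1
--             tokens.append(pattern[i:j])
--             i = j
--             continue
--
--         tokens.append(char)
--         i += 1
--
--     return tokens
-- ===== SOURCE B (Python) =====
-- from itertools import groupby
--
--
-- def _emit_unquoted(text: str, tokens: list) -> None:
--     """Emit tokens for unquoted text: alpha runs as one token, others char by char."""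
--     for ch, grp in groupby(text):
--         run = "".join(grp)
--         if ch.isalpha():
--             tokens.append(run)
--         else:
--             tokens.extend(run)
--
--
-- def _tokenize_babel_pattern(pattern: str) -> list[str]:
--     """Tokenize a CLDR pattern into atomic tokens (split-on-quote reassembly)."""
--     parts = pattern.split("'")
--     m = len(parts)
--     tokens: list[str] = []
--     k = 0
--     while k < m:
--         _emit_unquoted(parts[k], tokens)
--         k += 1
--         if k >= m:
--             break
--         if parts[k] == "" and k + 1 < m:
--             # doubled quote in unquoted context -> literal apostrophe token
--             tokens.append("'")
--             k += 1
--             continue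
--         # quoted section: content parts joined by escaped quotes
--         lit = parts[k]
--         while k + 1 < m and parts[k + 1] == "" and k + 2 < m:
--             lit += "'" + parts[k + 2]
--             k += 2
--         if lit:
--             tokens.append(lit)
--         k += 1
--     return tokens
-- ===== Notes on version B (the rewrite author's own statement) =====
-- stated objective: alternative
-- what changed: B replaces A's index-driven while loop with nested quote-state scanning by a split-on-apostrophe decomposition: pattern.split("'") is computed once, escaped quotes and quoted literals are reconstructed by walking the parts list, and unquoted parts are tokenized with itertools.groupby runs.
import Mathlib
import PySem

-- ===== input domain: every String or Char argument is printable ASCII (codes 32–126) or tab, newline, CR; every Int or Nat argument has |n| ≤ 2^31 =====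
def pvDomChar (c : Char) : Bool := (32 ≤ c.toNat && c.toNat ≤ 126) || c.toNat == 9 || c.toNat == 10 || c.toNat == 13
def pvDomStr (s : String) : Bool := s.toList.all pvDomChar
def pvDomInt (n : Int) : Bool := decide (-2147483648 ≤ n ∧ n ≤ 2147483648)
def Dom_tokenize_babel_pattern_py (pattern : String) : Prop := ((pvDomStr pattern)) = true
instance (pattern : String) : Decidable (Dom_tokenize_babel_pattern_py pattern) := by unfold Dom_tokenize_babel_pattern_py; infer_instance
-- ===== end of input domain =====

-- B re-implements A's single index-driven scanner as split("'") + parts-walk + groupby runs; same value on every input (alternative decomposition, no speed claim).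

-- ===== PORT A =====
-- inner while loop of A: collect quoted literal chars into acc, return (literal, rest after closing quote)
def pvQLoopA : List Char → List Char → List Char × List Char
  | acc, [] => (acc, [])
  | acc, c :: rest =>
      if c = '\'' then
        if rest.head? = some '\'' then pvQLoopA (acc ++ ['\'']) rest.tail
        else (acc, rest)
      else pvQLoopA (acc ++ [c]) rest
  termination_by _ cs => cs.length
  decreasing_by
    · simp only [List.length_cons, List.length_tail]; omega
    · simp only [List.length_cons]; omega

-- needed by pvTokA's termination proof
theorem pvQLoopA_len_aux : ∀ (n : Nat) (cs : List Char), cs.length ≤ n → ∀ acc, (pvQLoopA acc cs).2.length ≤ cs.length := by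
  intro n
  induction n with
  | zero =>
      intro cs h acc
      have hcs : cs = [] := List.length_eq_zero_iff.mp (Nat.le_zero.mp h)
      subst hcs; simp [pvQLoopA]
  | succ n ih =>
      intro cs h acc
      cases cs with
      | nil => simp [pvQLoopA]
      | cons c rest =>
          simp only [pvQLoopA]
          split_ifs with h1 h2
          · have h3 : rest.tail.length ≤ n := by
              simp only [List.length_cons] at h
              have := List.length_tail (l := rest); omega
            have := ih rest.tail h3 (acc ++ ['\''])
            have h4 := List.length_tail (l := rest)
            simp only [List.length_cons]; omega
          · simp only [List.length_cons]; omega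
          · have h3 : rest.length ≤ n := by simp only [List.length_cons] at h; omega
            have := ih rest h3 (acc ++ [c])
            simp only [List.length_cons]; omega

theorem pvQLoopA_len (acc cs : List Char) : (pvQLoopA acc cs).2.length ≤ cs.length :=
  pvQLoopA_len_aux cs.length cs le_rfl acc

def pvTokA : List Char → List (List Char)
  | [] => []
  | c :: rest =>
      if c = '\'' then
        if rest.head? = some '\'' then ['\''] :: pvTokA rest.tail
        else
          let q := pvQLoopA [] rest
          (if q.1 = [] then [] else [q.1]) ++ pvTokA q.2
      else if c.isAlpha then
        (c :: rest.takeWhile (fun x => x = c)) :: pvTokA (rest.dropWhile (fun x => x = c))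
      else [c] :: pvTokA rest
  termination_by cs => cs.length
  decreasing_by
    · simp only [List.length_cons, List.length_tail]; omega
    · have := pvQLoopA_len [] rest; simp only [List.length_cons]; omega
    · have := List.length_dropWhile_le (fun x => x = c) rest; simp only [List.length_cons]; omega
    · simp only [List.length_cons]; omega

def tokenize_babel_pattern_py (pattern : String) : List String :=
  (pvTokA pattern.toList).map (fun t => String.ofList t)

-- ===== PORT B =====
-- _emit_unquoted: groupby runs; alpha run = one token, other run = one token per char
def pvEmit : List Char → List (List Char)
  | [] => []
  | c :: rest =>
      (if c.isAlpha then [c :: rest.takeWhile (fun x => x = c)]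
       else (c :: rest.takeWhile (fun x => x = c)).map (fun x => [x])) ++
      pvEmit (rest.dropWhile (fun x => x = c))
  termination_by cs => cs.length
  decreasing_by
    · have := List.length_dropWhile_le (fun x => x = c) rest; simp only [List.length_cons]; omega

-- inner while of B: extend quoted literal across doubled quotes (empty part between two more parts)
def pvCollect : List Char → List (List Char) → List Char × List (List Char)
  | lit, a :: b :: t => if a = [] then pvCollect (lit ++ '\'' :: b) t else (lit, a :: b :: t)
  | lit, rest => (lit, rest)

-- needed by pvWalk's termination proof
theorem pvCollect_len_aux : ∀ (n : Nat) (rest : List (List Char)), rest.length ≤ n → ∀ lit, (pvCollect lit rest).2.length ≤ rest.length := by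
  intro n
  induction n with
  | zero =>
      intro rest h lit
      have : rest = [] := List.length_eq_zero_iff.mp (Nat.le_zero.mp h)
      subst this; simp [pvCollect]
  | succ n ih =>
      intro rest h lit
      cases rest with
      | nil => simp [pvCollect]
      | cons a rest' =>
          cases rest' with
          | nil => simp [pvCollect]
          | cons b t =>
              simp only [pvCollect]
              split_ifs with ha
              · have h3 : t.length ≤ n := by simp only [List.length_cons] at h; omega
                have := ih t h3 (lit ++ '\'' :: b)
                simp only [List.length_cons]; omega
              · simp only [List.length_cons]; omega

theorem pvCollect_len (lit : List Char) (rest : List (List Char)) : (pvCollect lit rest).2.length ≤ rest.length :=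
  pvCollect_len_aux rest.length rest le_rfl lit

-- main while loop of B over the parts of pattern.split("'")
def pvWalk : List (List Char) → List (List Char)
  | [] => []
  | [p] => pvEmit p
  | p :: q :: rest =>
      pvEmit p ++
      (if q = [] ∧ rest ≠ [] then ['\''] :: pvWalk rest
       else
         let c := pvCollect q rest
         (if c.1 = [] then [] else [c.1]) ++ pvWalk c.2)
  termination_by ps => ps.length
  decreasing_by
    · simp only [List.length_cons]; omega
    · have := pvCollect_len q rest; simp only [List.length_cons]; omega

def tokenize_babel_pattern_py_alt (pattern : String) : List String :=
  (pvWalk (PySem.Chars.splitOn pattern.toList ['\''])).map (fun t => String.ofList t)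

-- ===== PRECONDITION & SPEC =====
def Spec_tokenize_babel_pattern_py (pattern : String) (out : List String) : Prop := out = tokenize_babel_pattern_py_alt pattern
instance (pattern : String) (out : List String) : Decidable (Spec_tokenize_babel_pattern_py pattern out) := by unfold Spec_tokenize_babel_pattern_py; infer_instance

-- ===== CLAIM (what is proved, stated in full; the proofs are below) =====
def Claim_equal_tokenize_babel_pattern_py : Prop := ∀ (pattern : String), Dom_tokenize_babel_pattern_py pattern → Spec_tokenize_babel_pattern_py pattern (tokenize_babel_pattern_py pattern)

-- ===== LEMMAS AND PROOFS =====

-- proof-side specification of pattern.split("'")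
def pvSplitQ : List Char → List (List Char)
  | [] => [[]]
  | c :: r =>
      if c = '\'' then [] :: pvSplitQ r
      else
        match pvSplitQ r with
        | p :: ps => (c :: p) :: ps
        | [] => [[c]]

theorem pvSplitQ_ne_nil (cs : List Char) : pvSplitQ cs ≠ [] := by
  cases cs with
  | nil => simp [pvSplitQ]
  | cons c r =>
      simp only [pvSplitQ]
      split_ifs with hc
      · simp
      · rcases pvSplitQ r with _ | ⟨p, ps⟩ <;> simp

theorem pvSplitQ_cons (cs : List Char) : ∃ p ps, pvSplitQ cs = p :: ps := by
  rcases h : pvSplitQ cs with _ | ⟨p, ps⟩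
  · exact absurd h (pvSplitQ_ne_nil cs)
  · exact ⟨p, ps, rfl⟩

theorem pvQLoopA_pair (acc rest : List Char) :
    pvQLoopA acc ('\'' :: '\'' :: rest) = pvQLoopA (acc ++ ['\'']) rest := by
  rw [pvQLoopA.eq_def]
  simp

theorem pvQLoopA_close (acc rest : List Char) (hh : rest.head? ≠ some '\'') :
    pvQLoopA acc ('\'' :: rest) = (acc, rest) := by
  rw [pvQLoopA.eq_def]
  simp [hh]

theorem pvQLoopA_other (acc : List Char) (c : Char) (rest : List Char) (hc : ¬ (c = '\'')) :
    pvQLoopA acc (c :: rest) = pvQLoopA (acc ++ [c]) rest := by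
  rw [pvQLoopA.eq_def]
  simp [hc]

theorem pvTokA_quote_pair (r2 : List Char) : pvTokA ('\'' :: '\'' :: r2) = ['\''] :: pvTokA r2 := by
  rw [pvTokA.eq_def]
  simp

theorem pvTokA_quote (rest : List Char) (hh : rest.head? ≠ some '\'') :
    pvTokA ('\'' :: rest) =
      (if (pvQLoopA [] rest).1 = [] then [] else [(pvQLoopA [] rest).1]) ++ pvTokA (pvQLoopA [] rest).2 := by
  rw [pvTokA.eq_def]
  simp [hh]

theorem pv_go_eq : ∀ (fuel : Nat) (l cur : List Char) (acc : List (List Char)), l.length < fuel →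
    PySem.Chars.splitOn.go ['\''] fuel l cur acc =
      acc.reverse ++ ((cur.reverse ++ (pvSplitQ l).headI) :: (pvSplitQ l).tail) := by
  intro fuel
  induction fuel with
  | zero => intro l cur acc h; omega
  | succ fuel ih =>
      intro l cur acc h
      cases l with
      | nil => simp [PySem.Chars.splitOn.go, pvSplitQ]
      | cons c rest =>
          by_cases hc : c = '\''
          · subst hc
            have hpre : List.isPrefixOf ['\''] ('\'' :: rest) = true := by
              simp [List.isPrefixOf]
            simp only [PySem.Chars.splitOn.go, hpre, if_true, List.length_cons, List.length_nil]
            have hdrop : List.drop (0 + 1) ('\'' :: rest) = rest := rfl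
            rw [hdrop, ih rest [] (cur.reverse :: acc) (by simp only [List.length_cons] at h; omega)]
            obtain ⟨p, ps, hps⟩ := pvSplitQ_cons rest
            simp [pvSplitQ, hps]
          · have hpre : List.isPrefixOf ['\''] (c :: rest) = false := by
              simp [List.isPrefixOf, beq_eq_false_iff_ne, Ne.symm hc]
            simp only [PySem.Chars.splitOn.go, hpre, Bool.false_eq_true, if_false]
            rw [ih rest (c :: cur) acc (by simp only [List.length_cons] at h; omega)]
            obtain ⟨p, ps, hps⟩ := pvSplitQ_cons rest
            simp [pvSplitQ, hps, hc]

theorem splitOn_eq_pvSplitQ (cs : List Char) : PySem.Chars.splitOn cs ['\''] = pvSplitQ cs := by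
  have h := pv_go_eq (cs.length + 1) cs [] [] (by omega)
  obtain ⟨p, ps, hps⟩ := pvSplitQ_cons cs
  simp only [PySem.Chars.splitOn]
  rw [h, hps]
  simp

theorem pvQLoopA_acc_aux : ∀ (n : Nat) (cs : List Char), cs.length ≤ n → ∀ acc,
    pvQLoopA acc cs = (acc ++ (pvQLoopA [] cs).1, (pvQLoopA [] cs).2) := by
  intro n
  induction n with
  | zero =>
      intro cs h acc
      have hcs : cs = [] := List.length_eq_zero_iff.mp (Nat.le_zero.mp h)
      subst hcs; simp [pvQLoopA]
  | succ n ih =>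
      intro cs h acc
      cases cs with
      | nil => simp [pvQLoopA]
      | cons c rest =>
          simp only [pvQLoopA]
          split_ifs with h1 h2
          · have h3 : rest.tail.length ≤ n := by
              simp only [List.length_cons] at h
              have := List.length_tail (l := rest); omega
            rw [ih rest.tail h3 (acc ++ ['\'']), ih rest.tail h3 ([] ++ ['\''])]
            simp
          · simp
          · have h3 : rest.length ≤ n := by simp only [List.length_cons] at h; omega
            rw [ih rest h3 (acc ++ [c]), ih rest h3 ([] ++ [c])]
            simp
  
theorem pvQLoopA_acc (cs acc : List Char) :
    pvQLoopA acc cs = (acc ++ (pvQLoopA [] cs).1, (pvQLoopA [] cs).2) :=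
  pvQLoopA_acc_aux cs.length cs le_rfl acc

theorem pvCollect_acc_aux : ∀ (n : Nat) (t : List (List Char)), t.length ≤ n → ∀ (a b : List Char),
    pvCollect (a ++ b) t = (a ++ (pvCollect b t).1, (pvCollect b t).2) := by
  intro n
  induction n with
  | zero =>
      intro t h a b
      have : t = [] := List.length_eq_zero_iff.mp (Nat.le_zero.mp h)
      subst this; simp [pvCollect]
  | succ n ih =>
      intro t h a b
      cases t with
      | nil => simp [pvCollect]
      | cons x t' =>
          cases t' with
          | nil => simp [pvCollect]
          | cons y t2 =>
              simp only [pvCollect]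
              split_ifs with hx
              · have h3 : t2.length ≤ n := by simp only [List.length_cons] at h; omega
                have := ih t2 h3 a (b ++ '\'' :: y)
                simpa [List.append_assoc] using this
              · simp

theorem pvCollect_acc (t : List (List Char)) (a b : List Char) :
    pvCollect (a ++ b) t = (a ++ (pvCollect b t).1, (pvCollect b t).2) :=
  pvCollect_acc_aux t.length t le_rfl a b

theorem pvSplitQ_append : ∀ (u : List Char), '\'' ∉ u → ∀ (v : List Char) (p : List Char) (ps : List (List Char)),
    pvSplitQ v = p :: ps → pvSplitQ (u ++ v) = (u ++ p) :: ps := by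
  intro u
  induction u with
  | nil => intro _ v p ps hv; simpa using hv
  | cons c u' ih =>
      intro hu v p ps hv
      have hc : ¬ (c = '\'') := fun hh => hu (by simp [hh])
      have hu' : '\'' ∉ u' := fun hh => hu (by simp [hh])
      simp only [List.cons_append, pvSplitQ]
      rw [if_neg hc, ih hu' v p ps hv]

theorem pvEmit_cons_not_alpha (c : Char) (u : List Char) (hc : c.isAlpha = false) :
    pvEmit (c :: u) = [c] :: pvEmit u := by
  have key : pvEmit u = (u.takeWhile (fun x => x = c)).map (fun x => [x]) ++ pvEmit (u.dropWhile (fun x => x = c)) := by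
    cases u with
    | nil => simp [pvEmit]
    | cons x u2 =>
        by_cases hx : x = c
        · subst hx
          simp [pvEmit, hc]
        · simp [hx]
  simp only [pvEmit, hc, Bool.false_eq_true, if_false]
  simp only [List.map_cons, List.cons_append]
  rw [← key]

-- takeWhile/dropWhile across an append whose second part starts with a failing char
theorem pv_tw {p : Char → Bool} : ∀ (u v : List Char), (∀ a, v.head? = some a → p a = false) →
    (u ++ v).takeWhile p = u.takeWhile p ∧ (u ++ v).dropWhile p = u.dropWhile p ++ v := by
  intro u
  induction u with
  | nil =>
      intro v hv
      cases v with
      | nil => simp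
      | cons a w =>
          have := hv a rfl
          simp [this]
  | cons x u' ih =>
      intro v hv
      by_cases hx : p x = true
      · simp only [List.cons_append, List.takeWhile_cons, List.dropWhile_cons, hx, if_true]
        simp [(ih v hv).1, (ih v hv).2]
      · simp only [List.cons_append, List.takeWhile_cons, List.dropWhile_cons, hx]
        simp

theorem pvTokA_emit_aux : ∀ (n : Nat) (u : List Char), u.length ≤ n → '\'' ∉ u →
    ∀ v, (v = [] ∨ ∃ w, v = '\'' :: w) → pvTokA (u ++ v) = pvEmit u ++ pvTokA v := by
  intro n
  induction n with
  | zero =>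
      intro u h _ v _
      have : u = [] := List.length_eq_zero_iff.mp (Nat.le_zero.mp h)
      subst this; simp [pvEmit]
  | succ n ih =>
      intro u h hu v hv
      cases u with
      | nil => simp [pvEmit]
      | cons c u' =>
          have hc : ¬ (c = '\'') := fun hh => hu (by simp [hh])
          have hu' : '\'' ∉ u' := fun hh => hu (by simp [hh])
          have hvhead : ∀ a, v.head? = some a → (fun x => decide (x = c)) a = false := by
            rcases hv with rfl | ⟨w, rfl⟩
            · intro a ha; simp at ha
            · intro a ha
              simp only [List.head?_cons, Option.some.injEq] at ha
              subst ha
              simp only [decide_eq_false_iff_not]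
              exact Ne.symm hc
          simp only [List.cons_append, pvTokA]
          rw [if_neg hc]
          by_cases ha : c.isAlpha = true
          · rw [if_pos ha]
            obtain ⟨htw, hdw⟩ := pv_tw u' v hvhead
            rw [htw, hdw]
            have hlen : (u'.dropWhile (fun x => x = c)).length ≤ n :=
              le_trans (List.length_dropWhile_le _ _) (by simp only [List.length_cons] at h; omega)
            have hmem : '\'' ∉ u'.dropWhile (fun x => x = c) :=
              fun hh => hu' ((List.dropWhile_sublist _).subset hh)
            rw [ih _ hlen hmem v hv]
            simp [pvEmit, ha]
          · rw [if_neg ha]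
            rw [ih u' (by simp only [List.length_cons] at h; omega) hu' v hv]
            rw [pvEmit_cons_not_alpha c u' (by simpa using ha)]
            simp

theorem pvTokA_emit (u : List Char) (hu : '\'' ∉ u) (v : List Char)
    (hv : v = [] ∨ ∃ w, v = '\'' :: w) : pvTokA (u ++ v) = pvEmit u ++ pvTokA v :=
  pvTokA_emit_aux u.length u le_rfl hu v hv

theorem pvQ_aux : ∀ (n : Nat) (r : List Char), r.length ≤ n → ∀ (q : List Char) (ps : List (List Char)),
    pvSplitQ r = q :: ps →
    ∃ C, pvCollect q ps = ((pvQLoopA [] r).1, C) ∧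
      (C = pvSplitQ (pvQLoopA [] r).2 ∨ (C = [] ∧ (pvQLoopA [] r).2 = [])) := by
  intro n
  induction n with
  | zero =>
      intro r h q ps hsp
      have : r = [] := List.length_eq_zero_iff.mp (Nat.le_zero.mp h)
      subst this
      simp only [pvSplitQ, List.cons.injEq] at hsp
      obtain ⟨e1, e2⟩ := hsp
      subst e1; subst e2
      exact ⟨[], by simp [pvCollect, pvQLoopA], Or.inr ⟨rfl, by simp [pvQLoopA]⟩⟩
  | succ n ih =>
      intro r h q ps hsp
      cases r with
      | nil =>
          simp only [pvSplitQ, List.cons.injEq] at hsp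
          obtain ⟨e1, e2⟩ := hsp
          subst e1; subst e2
          exact ⟨[], by simp [pvCollect, pvQLoopA], Or.inr ⟨rfl, by simp [pvQLoopA]⟩⟩
      | cons c r' =>
          by_cases hc : c = '\''
          · subst hc
            have hsp' : ([] : List Char) :: pvSplitQ r' = q :: ps := by
              rw [← hsp]; simp [pvSplitQ]
            injection hsp' with e1 e2
            subst e1; subst e2
            by_cases hh : r'.head? = some '\''
            · obtain ⟨r2, rfl⟩ : ∃ r2, r' = '\'' :: r2 := by
                cases r' with
                | nil => simp at hh
                | cons a t =>
                    simp only [List.head?_cons, Option.some.injEq] at hh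
                    exact ⟨t, by rw [hh]⟩
              have hq : pvQLoopA [] ('\'' :: '\'' :: r2) = (['\''] ++ (pvQLoopA [] r2).1, (pvQLoopA [] r2).2) := by
                rw [pvQLoopA_pair, pvQLoopA_acc r2 ([] ++ ['\''])]
                simp
              obtain ⟨h2, t2, hsp2⟩ := pvSplitQ_cons r2
              obtain ⟨C, hC1, hC2⟩ := ih r2 (by simp only [List.length_cons] at h; omega) h2 t2 hsp2
              refine ⟨C, ?_, ?_⟩
              · have hps : pvSplitQ ('\'' :: r2) = [] :: h2 :: t2 := by simp [pvSplitQ, hsp2]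
                rw [hps]
                have step : pvCollect [] ([] :: h2 :: t2) = pvCollect ('\'' :: h2) t2 := by
                  simp [pvCollect]
                rw [step]
                have := pvCollect_acc t2 ['\''] h2
                simp only [List.singleton_append] at this
                rw [this, hC1, hq]
                simp
              · rw [hq]; exact hC2
            · have hq : pvQLoopA [] ('\'' :: r') = ([], r') := pvQLoopA_close [] r' hh
              refine ⟨pvSplitQ r', ?_, Or.inl (by rw [hq])⟩
              rw [hq]
              cases r' with
              | nil => simp [pvSplitQ, pvCollect]
              | cons d r2 =>
                  have hd : ¬ (d = '\'') := fun hdd => hh (by simp [hdd])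
                  obtain ⟨p0, ps0, h0⟩ := pvSplitQ_cons r2
                  have hdr : pvSplitQ (d :: r2) = (d :: p0) :: ps0 := by
                    simp [pvSplitQ, hd, h0]
                  rw [hdr]
                  cases ps0 with
                  | nil => simp [pvCollect]
                  | cons z zs => simp [pvCollect]
          · obtain ⟨p0, ps0, h0⟩ := pvSplitQ_cons r'
            have hsp' : (c :: p0) :: ps0 = q :: ps := by
              rw [← hsp]; simp [pvSplitQ, hc, h0]
            injection hsp' with e1 e2
            subst e1; subst e2
            have hq : pvQLoopA [] (c :: r') = (c :: (pvQLoopA [] r').1, (pvQLoopA [] r').2) := by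
              rw [pvQLoopA_other [] c r' hc, pvQLoopA_acc r' ([] ++ [c])]
              simp
            obtain ⟨C, hC1, hC2⟩ := ih r' (by simp only [List.length_cons] at h; omega) p0 ps0 h0
            refine ⟨C, ?_, ?_⟩
            · have := pvCollect_acc ps0 [c] p0
              simp only [List.singleton_append] at this
              rw [this, hC1, hq]
            · rw [hq]; exact hC2

theorem pvMain_aux : ∀ (n : Nat) (cs : List Char), cs.length ≤ n → pvTokA cs = pvWalk (pvSplitQ cs) := by
  intro n
  induction n with
  | zero =>
      intro cs h
      have : cs = [] := List.length_eq_zero_iff.mp (Nat.le_zero.mp h)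
      subst this; simp [pvTokA, pvSplitQ, pvWalk, pvEmit]
  | succ n ih =>
      intro cs h
      have hud : cs.takeWhile (fun x => x ≠ '\'') ++ cs.dropWhile (fun x => x ≠ '\'') = cs :=
        List.takeWhile_append_dropWhile
      have hu : '\'' ∉ cs.takeWhile (fun x => x ≠ '\'') := by
        intro hm
        have := List.mem_takeWhile_imp hm
        simp at this
      cases hd : cs.dropWhile (fun x => x ≠ '\'') with
      | nil =>
          have e1 : pvTokA cs = pvEmit (cs.takeWhile (fun x => x ≠ '\'')) := by
            conv_lhs => rw [← hud, hd]
            rw [pvTokA_emit _ hu [] (Or.inl rfl)]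
            simp [pvTokA]
          have e2 : pvSplitQ cs = [cs.takeWhile (fun x => x ≠ '\'')] := by
            conv_lhs => rw [← hud, hd]
            rw [pvSplitQ_append _ hu [] [] [] (by simp [pvSplitQ])]
            simp
          rw [e1, e2, pvWalk]
      | cons c r =>
          have hc : c = '\'' := by
            have hnot := List.head?_dropWhile_not (fun x => decide (x ≠ '\'')) cs
            rw [hd] at hnot
            simpa using hnot
          subst hc
          have e1 : pvTokA cs = pvEmit (cs.takeWhile (fun x => x ≠ '\'')) ++ pvTokA ('\'' :: r) := by
            conv_lhs => rw [← hud, hd]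
            exact pvTokA_emit _ hu _ (Or.inr ⟨r, rfl⟩)
          obtain ⟨q, ps, hq⟩ := pvSplitQ_cons r
          have e2 : pvSplitQ cs = cs.takeWhile (fun x => x ≠ '\'') :: q :: ps := by
            conv_lhs => rw [← hud, hd]
            rw [pvSplitQ_append _ hu ('\'' :: r) [] (pvSplitQ r) (by simp [pvSplitQ])]
            rw [hq]; simp
          have hlen : r.length + 1 ≤ cs.length := by
            conv_rhs => rw [← hud, hd]
            simp
          rw [e1, e2, pvWalk]
          congr 1
          by_cases hh : r.head? = some '\''
          · obtain ⟨r2, rfl⟩ : ∃ r2, r = '\'' :: r2 := by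
              cases r with
              | nil => simp at hh
              | cons a t =>
                  simp only [List.head?_cons, Option.some.injEq] at hh
                  exact ⟨t, by rw [hh]⟩
            have hq' : ([] : List Char) :: pvSplitQ r2 = q :: ps := by
              rw [← hq]; simp [pvSplitQ]
            injection hq' with e3 e4
            subst e3; subst e4
            rw [if_pos ⟨rfl, pvSplitQ_ne_nil r2⟩]
            rw [pvTokA_quote_pair r2]
            rw [ih r2 (by simp only [List.length_cons] at hlen; omega)]
          · have hcond : ¬ (q = [] ∧ ps ≠ []) := by
              cases r with
              | nil =>
                  have : ([[]] : List (List Char)) = q :: ps := by rw [← hq]; simp [pvSplitQ]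
                  injection this with e3 e4
                  subst e3; subst e4
                  simp
              | cons d r2 =>
                  have hdne : ¬ (d = '\'') := fun hdd => hh (by simp [hdd])
                  obtain ⟨p0, ps0, h0⟩ := pvSplitQ_cons r2
                  have : (d :: p0) :: ps0 = q :: ps := by rw [← hq]; simp [pvSplitQ, hdne, h0]
                  injection this with e3 e4
                  subst e3; subst e4
                  simp
            rw [if_neg hcond]
            rw [pvTokA_quote r hh]
            obtain ⟨C, hC1, hC2⟩ := pvQ_aux r.length r le_rfl q ps hq
            rw [hC1]
            simp only
            rcases hC2 with hC2 | ⟨rfl, hR⟩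
            · rw [hC2]
              have hlen2 : (pvQLoopA [] r).2.length ≤ n := by
                have := pvQLoopA_len [] r
                omega
              rw [ih (pvQLoopA [] r).2 hlen2]
            · rw [hR]
              simp [pvTokA, pvWalk]

theorem pvMain (cs : List Char) : pvTokA cs = pvWalk (pvSplitQ cs) :=
  pvMain_aux cs.length cs le_rfl

-- ===== VERDICT (by name: the statement is the Claim_ definition above) =====
theorem tokenize_babel_pattern_py_spec : Claim_equal_tokenize_babel_pattern_py := by
  intro pattern _
  unfold Spec_tokenize_babel_pattern_py tokenize_babel_pattern_py tokenize_babel_pattern_py_alt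
  rw [splitOn_eq_pvSplitQ, pvMain]
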